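-- pv_equiv track=rewrite | github.com/skaslev/fract | permutations.py | is_fractal
-- ===== SOURCE A (Python) =====
-- def is_fractal(p):
--     n = len(p)
--     if n == 1:
--         return p == [0]
--     return (
--         set(p) == set(range(n)) and
--         is_fractal([x//2 for x in p[:n//2]]) and
--         is_fractal([x//2 for x in p[n//2:]]))
-- ===== SOURCE B (Python) =====
-- def is_fractal(p):
--     # Iterative worklist (stack) instead of recursion; permutation test by
--     # sorting instead of set comparison.  Like the original, loops forever on [].
--     stack = [p]
--     while stack:
--         q = stack.pop()
--         m = len(q)
--         if m == 1:
--             if q != [0]: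
--                 return False
--             continue
--         if sorted(q) != list(range(m)):
--             return False
--         h = m // 2
--         stack.append([x // 2 for x in q[:h]])
--         stack.append([x // 2 for x in q[h:]])
--     return True
-- ===== Notes on version B (the rewrite author's own statement) =====
-- stated objective: alternative
-- what changed: Recursion replaced by an explicit stack worklist, and the set(p)==set(range(n)) permutation test replaced by sorted(q)==list(range(m)); Pre_ excludes only the empty list, on which neither program returns (A recurses forever, B loops forever).
-- outside the precondition, e.g. on is_fractal([]): A raises RecursionError, B does not finish within the time limit
import Mathlib
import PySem

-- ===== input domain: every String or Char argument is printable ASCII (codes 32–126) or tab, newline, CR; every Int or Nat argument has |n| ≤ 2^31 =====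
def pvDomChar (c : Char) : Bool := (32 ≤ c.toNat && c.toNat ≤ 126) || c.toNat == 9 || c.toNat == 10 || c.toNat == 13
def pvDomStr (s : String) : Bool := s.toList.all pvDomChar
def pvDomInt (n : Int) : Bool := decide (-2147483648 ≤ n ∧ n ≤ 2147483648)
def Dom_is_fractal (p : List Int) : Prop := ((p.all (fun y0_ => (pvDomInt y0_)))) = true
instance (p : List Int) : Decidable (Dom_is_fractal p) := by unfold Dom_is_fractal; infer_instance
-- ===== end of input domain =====

-- B replaces A's recursion by an explicit stack worklist and the set(p)==set(range(n))
-- permutation test by sorted(q)==list(range(m)); same return value on every nonempty list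
-- (on [] both Pythons never return, excluded by Pre_).

-- ===== PORT A =====
-- A's recursion, with a fuel parameter: on every nonempty list the fuel 2*len(p) given
-- below is enough (lemma isFractalA_stable below the claim block); Python A never
-- returns on [] (infinite recursion), and [] is excluded by Pre_is_fractal.
def isFractalA : Nat → List Int → Bool
  | 0, _ => false
  | fuel+1, p =>
    let n := p.length
    if n = 1 then decide (p = [0])
    else
      PySem.Set.equal (PySem.Set.ofList p) (PySem.Set.ofList (PySem.List.pyRange 0 (n : Int) 1))
      && isFractalA fuel ((PySem.List.slice p none (some ((n / 2 : Nat) : Int))).map (fun x => PySem.Int.floordiv x 2))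
      && isFractalA fuel ((PySem.List.slice p (some ((n / 2 : Nat) : Int)) none).map (fun x => PySem.Int.floordiv x 2))

def is_fractal (p : List Int) : Bool := isFractalA (2 * p.length) p

-- ===== PORT B =====
-- B's while-loop over the stack, same fuel idea (2*len(p) bounds the number of loop
-- iterations on a nonempty input, lemma isFractalB_all below).  The stack's TOP is the
-- HEAD of the list, so Python's append(first_half); append(second_half) pushes the
-- second half on top: second_half :: first_half :: rest.
def isFractalB : Nat → List (List Int) → Bool
  | _, [] => true
  | 0, _ :: _ => false
  | fuel+1, q :: rest =>
    let m := q.length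
    if m = 1 then (if q = [0] then isFractalB fuel rest else false)
    else if PySem.List.sorted q (fun x => x) false = PySem.List.pyRange 0 (m : Int) 1 then
      isFractalB fuel
        (((PySem.List.slice q (some ((m / 2 : Nat) : Int)) none).map (fun x => PySem.Int.floordiv x 2))
          :: ((PySem.List.slice q none (some ((m / 2 : Nat) : Int))).map (fun x => PySem.Int.floordiv x 2))
          :: rest)
    else false

def is_fractal_alt (p : List Int) : Bool := isFractalB (2 * p.length) [p]

-- ===== PRECONDITION & SPEC =====
-- Pre_ excludes only the empty list, on which Python A recurses forever (RecursionError)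
-- and Python B loops forever; neither program returns there.
def Pre_is_fractal (p : List Int) : Prop := p ≠ []
instance (p : List Int) : Decidable (Pre_is_fractal p) := by unfold Pre_is_fractal; infer_instance
def pvWitness_is_fractal : List Int := [0]

def Spec_is_fractal (p : List Int) (out : Bool) : Prop := out = is_fractal_alt p
instance (p : List Int) (out : Bool) : Decidable (Spec_is_fractal p out) := by unfold Spec_is_fractal; infer_instance

-- ===== CLAIM (what is proved, stated in full; the proofs are below) =====
def Claim_equal_is_fractal : Prop := ∀ (p : List Int), Dom_is_fractal p → Pre_is_fractal p → Spec_is_fractal p (is_fractal p)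

-- ===== LEMMAS AND PROOFS =====

-- Reference function: A's recursion, by well-founded recursion on the length
-- (total; its value on [] is irrelevant, [] is outside Pre_ and never reached from inside).
def fracF (p : List Int) : Bool :=
  if p.length ≤ 1 then decide (p = [0])
  else
    PySem.Set.equal (PySem.Set.ofList p) (PySem.Set.ofList (PySem.List.pyRange 0 (p.length : Int) 1))
    && fracF ((p.take (p.length / 2)).map (fun x => PySem.Int.floordiv x 2))
    && fracF ((p.drop (p.length / 2)).map (fun x => PySem.Int.floordiv x 2))
termination_by p.length
decreasing_by
  · simp only [List.length_map, List.length_take]; omega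
  · simp only [List.length_map, List.length_drop]; omega

-- A's fuel recursion computes fracF once fuel ≥ 2*len, for nonempty p.
lemma isFractalA_stable : ∀ (fuel : Nat) (p : List Int),
    1 ≤ p.length → 2 * p.length ≤ fuel → isFractalA fuel p = fracF p := by
  intro fuel
  induction fuel with
  | zero => intro p h1 h2; omega
  | succ f ih =>
    intro p h1 h2
    rw [fracF]
    show (if p.length = 1 then decide (p = [0]) else _) = _
    by_cases hn : p.length = 1
    · simp [hn]
    · have h2le : 2 ≤ p.length := by omega
      rw [if_neg hn, if_neg (by omega)]
      rw [PySem.List.slice_to_natCast, PySem.List.slice_from_natCast]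
      have e1 := ih ((p.take (p.length / 2)).map (fun x => PySem.Int.floordiv x 2))
        (by simp only [List.length_map, List.length_take]; omega)
        (by simp only [List.length_map, List.length_take]; omega)
      have e2 := ih ((p.drop (p.length / 2)).map (fun x => PySem.Int.floordiv x 2))
        (by simp only [List.length_map, List.length_drop]; omega)
        (by simp only [List.length_map, List.length_drop]; omega)
      rw [e1, e2]

-- The two permutation tests agree: set(q) == set(range(len(q)))  ⟺  sorted(q) == list(range(len(q))).
lemma check_iff (q : List Int) :
    PySem.Set.equal (PySem.Set.ofList q) (PySem.Set.ofList (PySem.List.pyRange 0 (q.length : Int) 1)) = true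
    ↔ PySem.List.sorted q (fun x => x) false = PySem.List.pyRange 0 (q.length : Int) 1 := by
  rw [PySem.Set.equal_iff]
  simp only [PySem.Set.mem_ofList]
  constructor
  · intro hmem
    have hnd : (PySem.List.pyRange 0 (q.length : Int) 1).Nodup := PySem.List.nodup_pyRange_one 0 _
    have hsub : PySem.List.pyRange 0 (q.length : Int) 1 ⊆ q := fun x hx => (hmem x).mpr hx
    have hsp : (PySem.List.pyRange 0 (q.length : Int) 1).Subperm q := List.subperm_of_subset hnd hsub
    have hlen : q.length ≤ (PySem.List.pyRange 0 (q.length : Int) 1).length := by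
      rw [PySem.List.length_pyRange_one]; omega
    have hperm : (PySem.List.pyRange 0 (q.length : Int) 1).Perm q :=
      hsp.perm_of_length_le hlen
    exact PySem.List.sorted_eq_of_perm_of_pairwise_lt q _ (fun x => x) hperm
      (PySem.List.pairwise_lt_pyRange_one 0 (q.length : Int))
  · intro hs x
    have hperm : (PySem.List.sorted q (fun x => x) false).Perm q := PySem.List.sorted_perm q _ _
    rw [hs] at hperm
    exact ⟨fun hx => hperm.mem_iff.mpr hx, fun hx => hperm.mem_iff.mp hx⟩

-- Cost of B's stack: remaining loop iterations.
def stackCost (st : List (List Int)) : Nat := (st.map (fun q => 2 * q.length - 1)).sum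

-- B's worklist computes the conjunction of fracF over the stack.
lemma isFractalB_all : ∀ (fuel : Nat) (st : List (List Int)),
    (∀ q ∈ st, 1 ≤ q.length) → stackCost st ≤ fuel → isFractalB fuel st = st.all fracF := by
  intro fuel
  induction fuel with
  | zero =>
    intro st hne hc
    cases st with
    | nil => rfl
    | cons q rest =>
      have := hne q (by simp)
      simp only [stackCost, List.map_cons, List.sum_cons] at hc
      omega
  | succ f ih =>
    intro st hne hc
    cases st with
    | nil => rfl
    | cons q rest =>
      have hq1 : 1 ≤ q.length := hne q (by simp)
      have hrest : ∀ r ∈ rest, 1 ≤ r.length := fun r hr => hne r (by simp [hr])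
      simp only [stackCost, List.map_cons, List.sum_cons] at hc
      show (if q.length = 1 then _ else _) = _
      by_cases hm : q.length = 1
      · rw [if_pos hm]
        have hfq : fracF q = decide (q = [0]) := by rw [fracF, if_pos (by omega)]
        by_cases hq0 : q = [0]
        · rw [if_pos hq0, ih rest hrest (by unfold stackCost; omega)]
          have hf0 : fracF [0] = true := by rw [fracF]; simp
          simp [List.all_cons, hq0, hf0]
        · rw [if_neg hq0]
          simp [List.all_cons, hfq, hq0]
      · have hm2 : 2 ≤ q.length := by omega
        rw [if_neg hm]
        have hfq : fracF q =
            (PySem.Set.equal (PySem.Set.ofList q)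
                (PySem.Set.ofList (PySem.List.pyRange 0 (q.length : Int) 1))
              && fracF ((q.take (q.length / 2)).map (fun x => PySem.Int.floordiv x 2))
              && fracF ((q.drop (q.length / 2)).map (fun x => PySem.Int.floordiv x 2))) := by
          rw [fracF, if_neg (by omega)]
        by_cases hs : PySem.List.sorted q (fun x => x) false = PySem.List.pyRange 0 (q.length : Int) 1
        · rw [if_pos hs]
          rw [PySem.List.slice_to_natCast, PySem.List.slice_from_natCast]
          have heq : PySem.Set.equal (PySem.Set.ofList q)
              (PySem.Set.ofList (PySem.List.pyRange 0 (q.length : Int) 1)) = true :=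
            (check_iff q).mpr hs
          have hlt : ((q.take (q.length / 2)).map (fun x => PySem.Int.floordiv x 2)).length = q.length / 2 := by
            simp only [List.length_map, List.length_take]; omega
          have hld : ((q.drop (q.length / 2)).map (fun x => PySem.Int.floordiv x 2)).length = q.length - q.length / 2 := by
            simp only [List.length_map, List.length_drop]
          rw [ih _ (by
                intro r hr
                simp only [List.mem_cons] at hr
                rcases hr with hr | hr | hr
                · rw [hr, hld]; omega
                · rw [hr, hlt]; omega
                · exact hrest r hr)
              (by
                unfold stackCost
                simp only [List.map_cons, List.sum_cons, hlt, hld]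
                omega)]
          simp only [List.all_cons, hfq, heq, Bool.true_and]
          cases fracF ((q.take (q.length / 2)).map (fun x => PySem.Int.floordiv x 2)) <;>
            cases fracF ((q.drop (q.length / 2)).map (fun x => PySem.Int.floordiv x 2)) <;> simp
        · rw [if_neg hs]
          have heq : PySem.Set.equal (PySem.Set.ofList q)
              (PySem.Set.ofList (PySem.List.pyRange 0 (q.length : Int) 1)) = false := by
            cases h : PySem.Set.equal (PySem.Set.ofList q)
              (PySem.Set.ofList (PySem.List.pyRange 0 (q.length : Int) 1)) with
            | false => rfl
            | true => exact absurd ((check_iff q).mp h) hs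
          simp [List.all_cons, hfq, heq]

-- ===== VERDICT (by name: the statement is the Claim_ definition above) =====
theorem is_fractal_spec : Claim_equal_is_fractal := by
  intro p _ hpre
  have h1 : 1 ≤ p.length := by
    cases p with
    | nil => exact absurd rfl hpre
    | cons a t => simp
  unfold Spec_is_fractal is_fractal is_fractal_alt
  rw [isFractalA_stable (2 * p.length) p h1 (by omega),
      isFractalB_all (2 * p.length) [p]
        (by intro q hq; simp only [List.mem_singleton] at hq; exact hq ▸ h1)
        (by unfold stackCost; simp only [List.map_cons, List.map_nil, List.sum_cons, List.sum_nil]; omega)]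
  simp [List.all_cons]
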